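-- pv_equiv track=rewrite | github.com/hunter-w-s/rflink-modem | tests/unit/fec/test_fec_conv_strong.py | _flip_burst
-- ===== SOURCE A (Python) =====
-- def _flip_burst(bits: list[int], start: int, length: int) -> list[int]:
--     out = bits[:]
--     n = len(out)
--     for i in range(length):
--         p = start + i
--         if 0 <= p < n:
--             out[p] ^= 1
--     return out
-- ===== SOURCE B (Python) =====
-- def _flip_burst(bits: list[int], start: int, length: int) -> list[int]:
--     return [b ^ 1 if start <= i < start + length else b for i, b in enumerate(bits)]
-- ===== Notes on version B (the rewrite author's own statement) =====
-- stated objective: idiomatic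
-- what changed: Replaced copy-then-patch over the burst index range (with an explicit in-bounds guard) by a single comprehension over enumerate(bits) that flips each element whose index falls in [start, start+length).
import Mathlib
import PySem

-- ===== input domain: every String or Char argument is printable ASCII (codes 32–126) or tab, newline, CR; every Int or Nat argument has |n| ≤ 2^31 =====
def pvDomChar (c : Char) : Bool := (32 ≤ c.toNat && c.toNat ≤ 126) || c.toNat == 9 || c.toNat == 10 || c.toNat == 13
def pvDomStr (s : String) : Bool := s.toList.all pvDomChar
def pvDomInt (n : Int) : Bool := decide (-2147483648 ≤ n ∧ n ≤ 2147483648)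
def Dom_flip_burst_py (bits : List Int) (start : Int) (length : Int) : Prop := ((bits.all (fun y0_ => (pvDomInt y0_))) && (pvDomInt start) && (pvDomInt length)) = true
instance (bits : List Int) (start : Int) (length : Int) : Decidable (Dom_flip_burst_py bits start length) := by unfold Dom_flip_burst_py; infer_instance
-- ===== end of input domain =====

-- B scans the whole list once with enumerate instead of copying and patching the burst range; same value on all inputs (A is total).

-- ===== PORT A =====
-- out = bits[:]; n = len(out); for i in range(length): p = start+i; if 0 <= p < n: out[p] ^= 1
def flip_burst_py (bits : List Int) (start : Int) (length : Int) : List Int :=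
  let out := bits
  let n : Int := out.length
  (PySem.List.pyRange 0 length 1).foldl
    (fun out i =>
      let p := start + i
      if 0 ≤ p ∧ p < n then
        PySem.List.pySetD out p (PySem.Int.bxor (PySem.List.pyGetD out p 0) 1)
      else out)
    out

-- ===== PORT B =====
-- [b ^ 1 if start <= i < start + length else b for i, b in enumerate(bits)]
def flip_burst_py_alt (bits : List Int) (start : Int) (length : Int) : List Int :=
  (PySem.List.enumerate bits).map
    (fun ib => if start ≤ ib.1 ∧ ib.1 < start + length then PySem.Int.bxor ib.2 1 else ib.2)

-- ===== PRECONDITION & SPEC =====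
def Spec_flip_burst_py (bits : List Int) (start : Int) (length : Int) (out : List Int) : Prop := out = flip_burst_py_alt bits start length
instance (bits : List Int) (start : Int) (length : Int) (out : List Int) : Decidable (Spec_flip_burst_py bits start length out) := by unfold Spec_flip_burst_py; infer_instance

-- ===== CLAIM (what is proved, stated in full; the proofs are below) =====
def Claim_equal_flip_burst_py : Prop := ∀ (bits : List Int) (start : Int) (length : Int), Dom_flip_burst_py bits start length → Spec_flip_burst_py bits start length (flip_burst_py bits start length)

-- ===== LEMMAS AND PROOFS =====

-- A's loop body, abstracted (n is len(bits), fixed before the loop)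
def pvStep (start n : Int) (out : List Int) (i : Int) : List Int :=
  if 0 ≤ start + i ∧ start + i < n then
    PySem.List.pySetD out (start + i) (PySem.Int.bxor (PySem.List.pyGetD out (start + i) 0) 1)
  else out

theorem pvStep_length (start n : Int) (out : List Int) (i : Int) :
    (pvStep start n out i).length = out.length := by
  unfold pvStep
  split
  · exact PySem.List.length_pySetD _ _ _
  · rfl

theorem pvFold_length (start n : Int) (L : List Int) (out : List Int) :
    (L.foldl (pvStep start n) out).length = out.length := by
  induction L generalizing out with
  | nil => rfl
  | cons i L ih => simpa [List.foldl, pvStep_length] using ih (pvStep start n out i)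

-- element j after folding A's step over a duplicate-free index list L:
-- flipped iff (j - start) ∈ L
theorem pvFold_getElem (start n : Int) (L : List Int) (hN : L.Nodup) :
    ∀ (out : List Int), (out.length : Int) = n → ∀ (j : Nat) (hj : j < out.length),
      (L.foldl (pvStep start n) out)[j]? =
        some (if ((j : Int) - start) ∈ L then PySem.Int.bxor out[j] 1 else out[j]) := by
  induction L with
  | nil => intro out hn j hj; simp [List.getElem?_eq_getElem hj]
  | cons i L ih =>
    intro out hn j hj
    rcases List.nodup_cons.mp hN with ⟨hi, hL⟩
    have hout' : (pvStep start n out i).length = out.length := pvStep_length _ _ _ _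
    have hIH := ih hL (pvStep start n out i) (by rw [hout']; exact hn) j (by omega)
    rw [List.foldl_cons, hIH]
    by_cases hij : (j : Int) - start = i
    · -- this iteration flips position j; later iterations leave it alone
      have hp : start + i = (j : Int) := by omega
      have hg : 0 ≤ start + i ∧ start + i < n := by constructor <;> omega
      have hstep : pvStep start n out i = out.set j (PySem.Int.bxor out[j] 1) := by
        unfold pvStep
        rw [if_pos hg, hp]
        rw [PySem.List.pySetD_natCast,
            PySem.List.pyGetD_eq_getElem out 0 (by omega) (by omega)]
        simp
      have hnot : ¬ ((j : Int) - start) ∈ L := by rw [hij]; exact hi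
      rw [if_neg hnot, if_pos (show ((j : Int) - start) ∈ i :: L by rw [hij]; exact List.mem_cons_self)]
      congr 1
      simp [hstep, List.getElem_set_self]
    · -- position j untouched by this iteration
      have hstep_j : (pvStep start n out i)[j]'(by omega) = out[j] := by
        unfold pvStep
        split
        · rename_i hg
          have hne : (start + i).toNat ≠ j := by omega
          simp [PySem.List.pySetD_of_nonneg _ _ hg.1, hne]
        · rfl
      rw [hstep_j]
      have hmem : (((j : Int) - start) ∈ i :: L) ↔ (((j : Int) - start) ∈ L) := by
        simp [List.mem_cons, hij]
      simp only [hmem]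

theorem flip_burst_py_getElem (bits : List Int) (start length : Int)
    (j : Nat) (hj : j < bits.length) :
    (flip_burst_py bits start length)[j]? =
      some (if start ≤ (j : Int) ∧ (j : Int) < start + length
            then PySem.Int.bxor bits[j] 1 else bits[j]) := by
  unfold flip_burst_py
  have hstep_eq : (fun (out : List Int) (i : Int) =>
      let p := start + i
      if 0 ≤ p ∧ p < (bits.length : Int) then
        PySem.List.pySetD out p (PySem.Int.bxor (PySem.List.pyGetD out p 0) 1)
      else out) = pvStep start (bits.length : Int) := rfl
  have h := pvFold_getElem start (bits.length : Int) (PySem.List.pyRange 0 length 1)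
    (PySem.List.nodup_pyRange_one 0 length) bits rfl j hj
  simp only []
  rw [hstep_eq, h]
  have hiff : (((j : Int) - start) ∈ PySem.List.pyRange 0 length 1) ↔
      (start ≤ (j : Int) ∧ (j : Int) < start + length) := by
    rw [PySem.List.mem_pyRange_one]; omega
  simp only [hiff]

theorem flip_burst_py_alt_getElem (bits : List Int) (start length : Int)
    (j : Nat) (hj : j < bits.length) :
    (flip_burst_py_alt bits start length)[j]? =
      some (if start ≤ (j : Int) ∧ (j : Int) < start + length
            then PySem.Int.bxor bits[j] 1 else bits[j]) := by
  unfold flip_burst_py_alt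
  rw [List.getElem?_map, PySem.List.getElem?_enumerate]
  rw [List.getElem?_eq_getElem hj]
  simp

-- ===== VERDICT (by name: the statement is the Claim_ definition above) =====
theorem flip_burst_py_spec : Claim_equal_flip_burst_py := by
  intro bits start length _
  unfold Spec_flip_burst_py
  have hlenA : (flip_burst_py bits start length).length = bits.length := by
    unfold flip_burst_py
    exact pvFold_length _ _ _ _
  have hlenB : (flip_burst_py_alt bits start length).length = bits.length := by
    unfold flip_burst_py_alt
    simp [PySem.List.length_enumerate]
  apply List.ext_getElem?
  intro j
  by_cases hj : j < bits.length
  · rw [flip_burst_py_getElem bits start length j hj,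
        flip_burst_py_alt_getElem bits start length j hj]
  · rw [List.getElem?_eq_none (by omega), List.getElem?_eq_none (by omega)]
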